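-- pv_equiv track=rewrite | github.com/SpangleLabs/Hallo | ircbot_chk.py | chk_msg_numbers
-- ===== SOURCE A (Python) =====
-- def chk_msg_numbers(args):
--     'checks that an argument is purely numbers'
--     args = args.lower()
--     validchars = [str(x) for x in range(10)] + ['.']
--     if(args[0]=='-'):
--         args = args[1:]
--     for char in validchars:
--         args = args.replace(char,"")
--     if(args==""):
--         return True
--     else:
--         return False
-- ===== SOURCE B (Python) =====
-- def chk_msg_numbers(args):
--     'checks that an argument is purely numbers'
--     body = args[1:] if args.startswith('-') else args
--     return all(ch in "0123456789." for ch in body)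
-- ===== Notes on version B (the rewrite author's own statement) =====
-- stated objective: simpler
-- what changed: Replaced the eleven replace-then-check-empty passes (and the irrelevant lower()) with a single all() membership scan over the characters after an optional leading dash.
import Mathlib
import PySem

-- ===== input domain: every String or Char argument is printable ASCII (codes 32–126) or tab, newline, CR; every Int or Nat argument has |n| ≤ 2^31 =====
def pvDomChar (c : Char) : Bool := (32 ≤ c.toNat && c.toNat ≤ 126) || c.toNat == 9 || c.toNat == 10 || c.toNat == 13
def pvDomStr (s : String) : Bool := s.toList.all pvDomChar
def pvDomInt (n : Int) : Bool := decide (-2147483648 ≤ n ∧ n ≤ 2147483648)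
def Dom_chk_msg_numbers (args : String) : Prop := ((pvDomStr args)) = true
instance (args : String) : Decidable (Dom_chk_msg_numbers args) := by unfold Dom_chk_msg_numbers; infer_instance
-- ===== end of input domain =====

-- B replaces A's eleven replace-then-check-empty passes (and the no-op lower()) with one membership scan; simpler, same result.


-- ===== PORT A =====
def chk_msg_numbers (args : String) : Bool :=
  let args1 := PySem.Str.lower args
  let validchars : List String := (PySem.List.pyRange 0 10 1).map PySem.Int.toStr ++ ["."]
  let args2 := if PySem.Str.pyGet? args1 0 = some '-' then PySem.Str.slice args1 (some 1) none else args1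
  let args3 := validchars.foldl (fun s ch => PySem.Str.replace s ch "") args2
  if args3 = "" then true else false

-- ===== PORT B =====
def chk_msg_numbers_alt (args : String) : Bool :=
  let body := if PySem.Str.startswith args "-" then PySem.Str.slice args (some 1) none else args
  body.toList.all (fun ch => PySem.Chars.isIn [ch] "0123456789.".toList)

-- ===== PRECONDITION & SPEC =====
-- Pre_ excludes only the empty string, on which A raises IndexError at args[0].
def Pre_chk_msg_numbers (args : String) : Prop := args ≠ ""
instance (args : String) : Decidable (Pre_chk_msg_numbers args) := by unfold Pre_chk_msg_numbers; infer_instance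
def pvWitness_chk_msg_numbers : String := "-12.5"
def Spec_chk_msg_numbers (args : String) (out : Bool) : Prop := out = chk_msg_numbers_alt args
instance (args : String) (out : Bool) : Decidable (Spec_chk_msg_numbers args out) := by unfold Spec_chk_msg_numbers; infer_instance

-- ===== CLAIM (what is proved, stated in full; the proofs are below) =====
def Claim_equal_chk_msg_numbers : Prop := ∀ (args : String), Dom_chk_msg_numbers args → Pre_chk_msg_numbers args → Spec_chk_msg_numbers args (chk_msg_numbers args)

-- ===== LEMMAS AND PROOFS =====

-- the eleven valid characters, as chars
def pvValid : List Char := ['0','1','2','3','4','5','6','7','8','9','.']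

lemma pv_validchars_eq :
    ((PySem.List.pyRange 0 10 1).map PySem.Int.toStr ++ ["."]) =
      ["0","1","2","3","4","5","6","7","8","9","."] := by decide

lemma pv_go_single (c : Char) : ∀ (l : List Char) (fuel : Nat) (acc : List Char),
    l.length ≤ fuel →
    PySem.Chars.replace.go [c] [] fuel l acc = acc.reverse ++ l.filter (fun x => x != c) := by
  intro l
  induction l with
  | nil => intro fuel acc _; cases fuel <;> simp [PySem.Chars.replace.go]
  | cons a t ih =>
    intro fuel acc hf
    cases fuel with
    | zero => simp at hf
    | succ n =>
      by_cases h : c = a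
      · subst h
        rw [show PySem.Chars.replace.go [c] [] (n+1) (c :: t) acc
              = PySem.Chars.replace.go [c] [] n t acc from by
            simp [PySem.Chars.replace.go, List.isPrefixOf]]
        rw [ih n acc (by simpa using hf)]
        simp
      · rw [show PySem.Chars.replace.go [c] [] (n+1) (a :: t) acc
              = PySem.Chars.replace.go [c] [] n t (a :: acc) from by
            simp [PySem.Chars.replace.go, List.isPrefixOf, h]]
        rw [ih n (a :: acc) (by simpa using hf)]
        simp [Ne.symm h]

lemma pv_replace_single (l : List Char) (c : Char) :
    PySem.Chars.replace l [c] [] = l.filter (fun x => x != c) := by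
  simp [PySem.Chars.replace, pv_go_single c l l.length [] (le_refl _)]

lemma pv_isIn_single (c : Char) (l : List Char) :
    PySem.Chars.isIn [c] l = l.contains c := by
  rcases h : l.contains c with _ | _
  · rw [PySem.Chars.isIn_eq_false_iff]
    intro hin
    have : c ∈ l := hin.subset (List.mem_singleton_self c)
    simp at h; exact h this
  · rw [PySem.Chars.isIn_iff_infix]
    simp at h
    obtain ⟨s, t, rfl⟩ := List.append_of_mem h
    exact ⟨s, t, by simp⟩

lemma pv_upper_not_valid (c : Char) (h : PySem.Chars.isupper c = true) :
    pvValid.contains c = false := by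
  simp [PySem.Chars.isupper, Char.le_def] at h
  simp only [pvValid, List.contains_cons, List.contains_nil, Bool.or_eq_false_iff,
    beq_eq_false_iff_ne]
  refine ⟨?_,?_,?_,?_,?_,?_,?_,?_,?_,?_,?_,trivial⟩ <;> rintro rfl <;> simp_all

lemma pv_lowerChar_toNat_of_upper (c : Char) (h : PySem.Chars.isupper c = true) :
    (PySem.Chars.lowerChar c).toNat = c.toNat + 32 := by
  have hb : 65 ≤ c.toNat ∧ c.toNat ≤ 90 := by
    simpa [PySem.Chars.isupper, Char.le_def] using h
  rw [PySem.Chars.lowerChar, if_pos h, Char.toNat_ofNat,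
    if_pos (Or.inl (by omega) : (c.toNat + 32).isValidChar)]

lemma pv_contains_lowerChar (c : Char) :
    pvValid.contains (PySem.Chars.lowerChar c) = pvValid.contains c := by
  by_cases h : PySem.Chars.isupper c = true
  · rw [pv_upper_not_valid c h]
    have hb : 65 ≤ c.toNat ∧ c.toNat ≤ 90 := by
      simpa [PySem.Chars.isupper, Char.le_def] using h
    have ht := pv_lowerChar_toNat_of_upper c h
    simp only [pvValid, List.contains_cons, List.contains_nil, Bool.or_eq_false_iff,
      beq_eq_false_iff_ne]
    refine ⟨?_,?_,?_,?_,?_,?_,?_,?_,?_,?_,?_,trivial⟩ <;> intro he <;>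
      rw [he] at ht <;> simp at ht <;> omega
  · rw [PySem.Chars.lowerChar, if_neg h]

lemma pv_lowerChar_dash (c : Char) : (PySem.Chars.lowerChar c = '-') ↔ c = '-' := by
  by_cases h : PySem.Chars.isupper c = true
  · have hb : 65 ≤ c.toNat ∧ c.toNat ≤ 90 := by
      simpa [PySem.Chars.isupper, Char.le_def] using h
    have ht := pv_lowerChar_toNat_of_upper c h
    constructor <;> intro he <;> exfalso
    · rw [he] at ht
      have h45 : ('-' : Char).toNat = 45 := by decide
      rw [h45] at ht; omega
    · rw [he] at hb
      exact absurd hb (by decide)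
  · rw [PySem.Chars.lowerChar, if_neg h]

lemma pv_toList_eq_nil (s : String) : s = "" ↔ s.toList = [] := by
  constructor
  · rintro rfl; rfl
  · intro h; exact String.toList_injective (by simpa using h)

lemma pv_ite_empty (s : String) : (if s = "" then true else false) = s.toList.isEmpty := by
  by_cases h : s = ""
  · subst h; rfl
  · rw [if_neg h]
    have hne : s.toList ≠ [] := fun hh => h ((pv_toList_eq_nil s).mpr hh)
    simp [hne]

-- A's fold of eleven single-character deletions is one filter
lemma pv_fold_eleven (s : String) :
    (["0","1","2","3","4","5","6","7","8","9","."].foldl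
        (fun s ch => PySem.Str.replace s ch "") s).toList
      = s.toList.filter (fun x => !(pvValid.contains x)) := by
  simp only [List.foldl_cons, List.foldl_nil, PySem.Str.toList_replace]
  rw [show ("0" : String).toList = ['0'] from rfl, show ("1" : String).toList = ['1'] from rfl,
    show ("2" : String).toList = ['2'] from rfl, show ("3" : String).toList = ['3'] from rfl,
    show ("4" : String).toList = ['4'] from rfl, show ("5" : String).toList = ['5'] from rfl,
    show ("6" : String).toList = ['6'] from rfl, show ("7" : String).toList = ['7'] from rfl,
    show ("8" : String).toList = ['8'] from rfl, show ("9" : String).toList = ['9'] from rfl,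
    show ("." : String).toList = ['.'] from rfl, show ("" : String).toList = [] from rfl]
  simp only [pv_replace_single, List.filter_filter]
  apply List.filter_congr
  intros
  simp only [pvValid, List.contains_cons, List.contains_nil, Bool.or_false, Bool.not_or]
  ac_rfl

lemma pv_isEmpty_filter_not (p : Char → Bool) (m : List Char) :
    (m.filter (fun x => !(p x))).isEmpty = m.all p := by
  induction m with
  | nil => rfl
  | cons a t ih =>
    simp only [List.filter_cons, List.all_cons]
    cases h : p a <;> simp [ih]

lemma pv_all_lower (m : List Char) :
    (m.map PySem.Chars.lowerChar).all (fun x => pvValid.contains x)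
      = m.all (fun x => pvValid.contains x) := by
  rw [List.all_map]
  apply List.all_congr rfl
  intros
  simp only [Function.comp_apply]
  exact pv_contains_lowerChar _

-- ===== VERDICT (by name: the statement is the Claim_ definition above) =====
theorem chk_msg_numbers_spec : Claim_equal_chk_msg_numbers := by
  intro args _ hpre
  unfold Spec_chk_msg_numbers chk_msg_numbers chk_msg_numbers_alt
  simp only [pv_validchars_eq]
  obtain ⟨a, rest, hal⟩ : ∃ a rest, args.toList = a :: rest := by
    rcases hl : args.toList with _ | ⟨a, rest⟩
    · exact absurd ((pv_toList_eq_nil args).mpr hl) hpre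
    · exact ⟨a, rest, rfl⟩
  have hlower : (PySem.Str.lower args).toList
      = PySem.Chars.lowerChar a :: rest.map PySem.Chars.lowerChar := by
    simp [PySem.Chars.lower, hal]
  have hgetA : PySem.Str.pyGet? (PySem.Str.lower args) 0 = some (PySem.Chars.lowerChar a) := by
    simp [hlower]
  have hsw : PySem.Str.startswith args "-" = ('-' == a) := by
    have : PySem.Chars.startswith args.toList ['-'] = ('-' == a) := by
      simp only [PySem.Chars.startswith, hal, List.isPrefixOf, Bool.and_true]
    simpa using this
  have hcore : ∀ m : List Char,
      (m.map PySem.Chars.lowerChar).all (fun x => pvValid.contains x)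
        = m.all (fun ch => PySem.Chars.isIn [ch] "0123456789.".toList) := by
    intro m
    rw [pv_all_lower]
    apply List.all_congr rfl
    intros
    simp only [pv_isIn_single]
    rfl
  by_cases hd : a = '-'
  · subst hd
    rw [hgetA, if_pos (show some (PySem.Chars.lowerChar '-') = some '-' by decide), hsw,
      if_pos (show (('-' : Char) == '-') = true by decide)]
    have hslA : (PySem.Str.slice (PySem.Str.lower args) (some 1) none).toList
        = rest.map PySem.Chars.lowerChar := by
      simp only [PySem.Str.toList_slice, PySem.Chars.slice_eq_listSlice,
        PySem.List.slice_from_one]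
      simp [hlower]
    have hslB : (PySem.Str.slice args (some 1) none).toList = rest := by
      simp only [PySem.Str.toList_slice, PySem.Chars.slice_eq_listSlice,
        PySem.List.slice_from_one]
      simp [hal]
    rw [pv_ite_empty, pv_fold_eleven, hslA, pv_isEmpty_filter_not, hcore, hslB]
  · rw [hgetA, if_neg (fun hc => hd ((pv_lowerChar_dash a).mp (Option.some.inj hc))), hsw,
      if_neg (fun hc => hd ((beq_iff_eq.mp hc).symm))]
    have hml : (PySem.Str.lower args).toList = args.toList.map PySem.Chars.lowerChar := by
      simp [PySem.Chars.lower]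
    rw [pv_ite_empty, pv_fold_eleven, hml, pv_isEmpty_filter_not, hcore]
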